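-- pv_equiv track=rewrite | github.com/Tommimon/advent-of-code-2021 | mynam3isg00d/d13/BONUS CONTENT/generator.py | convert
-- ===== SOURCE A (Python) =====
-- import math as m
--
-- letterDict = {
--   "A" : ".###.#...##...#######...##...#",
--   "B" : "####.#...#####.#...##...#####.",
--   "C" : ".#####....#....#....#.....####",
--   "D" : "####.#...##...##...##...#####.",
--   "E" : "######....####.#....#....#####",
--   "F" : "######....####.#....#....#....",
--   "G" : ".###.#....#.####...##...#.###.",
--   "H" : "#...##...#######...##...##...#",
--   "I" : ".###...#....#....#....#...###.",
--   "J" : "#####...#....#....#.#..#..##..",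
--   "K" : "#...##..#.###..#..#.#..#.#...#",
--   "L" : "#....#....#....#....#....#####",
--   "M" : "#...###.###.#.##...##...##...#",
--   "N" : "#...###..##.#.##..###...##...#",
--   "O" : ".###.#...##...##...##...#.###.",
--   "P" : "####.#...#####.#....#....#....",
--   "Q" : ".###.#...##...##...##..#..##.#",
--   "R" : "####.#...#####.#..#.#...##...#",
--   "S" : ".#####.....###.....#....#####.",
--   "T" : "#####..#....#....#....#....#..",
--   "U" : "#...##...##...##...##...#.###.",
--   "V" : "#...##...##...#.#.#..#.#...#..",
--   "W" : "#...##...##.#.#.#.#..#.#..#.#.",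
--   "X" : "#...#.#.#...#...#.#.#...##...#",
--   "Y" : "#...#.#.#...#....#....#....#..",
--   "Z" : "#####...#...#...#...#....#####",
--   " " : "..............................",
-- }
--
-- def convert(a):
--   points = set()
--   pivot = 0
--   for c in a:
--     for i in range(0, len(letterDict[c])):
--       if (letterDict[c][i] == '#'):
--         points.add(((6 * pivot + (i % 5), m.floor(i/5))))
--     pivot += 1
--   return points
-- ===== SOURCE B (Python) =====
-- letterDict = {
--   "A" : ".###.#...##...#######...##...#",
--   "B" : "####.#...#####.#...##...#####.",
--   "C" : ".#####....#....#....#.....####",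
--   "D" : "####.#...##...##...##...#####.",
--   "E" : "######....####.#....#....#####",
--   "F" : "######....####.#....#....#....",
--   "G" : ".###.#....#.####...##...#.###.",
--   "H" : "#...##...#######...##...##...#",
--   "I" : ".###...#....#....#....#...###.",
--   "J" : "#####...#....#....#.#..#..##..",
--   "K" : "#...##..#.###..#..#.#..#.#...#",
--   "L" : "#....#....#....#....#....#####",
--   "M" : "#...###.###.#.##...##...##...#",
--   "N" : "#...###..##.#.##..###...##...#",
--   "O" : ".###.#...##...##...##...#.###.",
--   "P" : "####.#...#####.#....#....#....",
--   "Q" : ".###.#...##...##...##..#..##.#",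
--   "R" : "####.#...#####.#..#.#...##...#",
--   "S" : ".#####.....###.....#....#####.",
--   "T" : "#####..#....#....#....#....#..",
--   "U" : "#...##...##...##...##...#.###.",
--   "V" : "#...##...##...#.#.#..#.#...#..",
--   "W" : "#...##...##.#.#.#.#..#.#..#.#.",
--   "X" : "#...#.#.#...#...#.#.#...##...#",
--   "Y" : "#...#.#.#...#....#....#....#..",
--   "Z" : "#####...#...#...#...#....#####",
--   " " : "..............................",
-- }
--
-- # each glyph packed once, at import, into a single 30-bit integer mask (bit i set iff bitmap[i] == '#')
-- letterBits = {k: sum(2 ** i for i, ch in enumerate(v) if ch == '#') for k, v in letterDict.items()}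
--
-- def convert(a):
--   points = set()
--   for pivot, c in enumerate(a):
--     bits = letterBits[c]
--     i = 0
--     while bits:
--       if bits % 2:
--         points.add((6 * pivot + i % 5, i // 5))
--       bits //= 2
--       i += 1
--   return points
-- ===== Notes on version B (the rewrite author's own statement) =====
-- stated objective: alternative
-- what changed: Each glyph is packed once at import into a single 30-bit integer bitmask; convert decodes a mask per character with a while/shift loop (bits % 2 test, bits //= 2) that stops at the highest set bit, instead of indexing the bitmap string at all 30 positions.
-- outside the precondition, e.g. on convert('#'): A raises KeyError, B raises KeyError
import Mathlib
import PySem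

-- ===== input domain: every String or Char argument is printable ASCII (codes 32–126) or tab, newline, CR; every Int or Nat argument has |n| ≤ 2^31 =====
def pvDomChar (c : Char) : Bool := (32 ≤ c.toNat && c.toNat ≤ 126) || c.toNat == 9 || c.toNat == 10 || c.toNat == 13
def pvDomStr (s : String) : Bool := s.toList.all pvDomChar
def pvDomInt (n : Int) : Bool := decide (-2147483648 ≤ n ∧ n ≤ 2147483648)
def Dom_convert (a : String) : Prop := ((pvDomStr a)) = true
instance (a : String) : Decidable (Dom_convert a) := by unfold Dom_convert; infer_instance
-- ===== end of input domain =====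

-- B packs each glyph once, at import, into a 30-bit integer mask and decodes it with a
-- while/shift loop at call time, instead of indexing the bitmap string at all 30 positions.
-- Result is a Python set (compared as a set); Pre_ excludes characters outside letterDict,
-- where both A and B raise KeyError.

-- ===== PORT A =====
-- Python dict with one-char string keys, modelled with Char keys (a's chars).
def letterDictA : PySem.Dict Char String := PySem.Dict.mk [
  ('A', ".###.#...##...#######...##...#"),
  ('B', "####.#...#####.#...##...#####."),
  ('C', ".#####....#....#....#.....####"),
  ('D', "####.#...##...##...##...#####."),
  ('E', "######....####.#....#....#####"),
  ('F', "######....####.#....#....#...."),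
  ('G', ".###.#....#.####...##...#.###."),
  ('H', "#...##...#######...##...##...#"),
  ('I', ".###...#....#....#....#...###."),
  ('J', "#####...#....#....#.#..#..##.."),
  ('K', "#...##..#.###..#..#.#..#.#...#"),
  ('L', "#....#....#....#....#....#####"),
  ('M', "#...###.###.#.##...##...##...#"),
  ('N', "#...###..##.#.##..###...##...#"),
  ('O', ".###.#...##...##...##...#.###."),
  ('P', "####.#...#####.#....#....#...."),
  ('Q', ".###.#...##...##...##..#..##.#"),
  ('R', "####.#...#####.#..#.#...##...#"),
  ('S', ".#####.....###.....#....#####."),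
  ('T', "#####..#....#....#....#....#.."),
  ('U', "#...##...##...##...##...#.###."),
  ('V', "#...##...##...#.#.#..#.#...#.."),
  ('W', "#...##...##.#.#.#.#..#.#..#.#."),
  ('X', "#...#.#.#...#...#.#.#...##...#"),
  ('Y', "#...#.#.#...#....#....#....#.."),
  ('Z', "#####...#...#...#...#....#####"),
  (' ', "..............................")]

-- letterDict[c] is ported as getD with default ""; the KeyError case (get? = none) is
-- excluded by Pre_convert, so the default is never reached on admitted inputs.
-- m.floor(i/5) is exact floor division here (0 ≤ i): PySem.Int.floordiv.
def convert (a : String) : List (Int × Int) :=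
  (a.toList.foldl
    (fun (st : List (Int × Int) × Int) c =>
      ((PySem.List.pyRange 0 (PySem.Str.len (PySem.Dict.getD letterDictA c "")) 1).foldl
        (fun pts i =>
          if PySem.Str.pyGet? (PySem.Dict.getD letterDictA c "") i == some '#' then
            PySem.Set.add pts (6 * st.2 + PySem.Int.mod i 5, PySem.Int.floordiv i 5)
          else pts) st.1,
       st.2 + 1))
    (PySem.Set.empty, 0)).1

-- ===== PORT B =====
-- the generator-sum of Source B: the glyph's 30-bit mask, bit i set iff bitmap[i] == '#'
-- (2 ** i ported as 2 ^ i.toNat — exact, enumerate indices are ≥ 0)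
def bitsOf (v : String) : Int :=
  ((PySem.List.enumerate v.toList 0).filter (fun p => p.2 == '#')).foldl
    (fun s p => s + 2 ^ p.1.toNat) 0

-- the dict comprehension of Source B (keys of letterDict are distinct, so mapping the item
-- list is exactly the comprehension's insertion order)
def letterBitsB : PySem.Dict Char Int :=
  PySem.Dict.mk (letterDictA.items.map (fun kv => (kv.1, bitsOf kv.2)))

-- the 'while bits:' body of Source B. Python's 'while bits' loops while bits ≠ 0; every mask
-- here is ≥ 0 (a sum of powers of two), on which 'bits ≤ 0' is the same stop condition
-- and makes the recursion well-founded.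
def glyphLoop (pts : List (Int × Int)) (bits : Int) (pivot i : Int) : List (Int × Int) :=
  if h : bits ≤ 0 then pts
  else
    glyphLoop
      (if PySem.Int.mod bits 2 ≠ 0 then
        PySem.Set.add pts (6 * pivot + PySem.Int.mod i 5, PySem.Int.floordiv i 5)
      else pts)
      (PySem.Int.floordiv bits 2) pivot (i + 1)
termination_by bits.toNat
decreasing_by
  rw [PySem.Int.floordiv_eq_ediv_of_pos (by omega)]
  omega

-- letterBits[c] ported as getD 0; the KeyError case is excluded by Pre_convert.
def convert_alt (a : String) : List (Int × Int) :=
  (PySem.List.enumerate a.toList 0).foldl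
    (fun pts pc => glyphLoop pts (PySem.Dict.getD letterBitsB pc.2 0) pc.1 0)
    PySem.Set.empty

-- ===== PRECONDITION & SPEC =====
-- Pre_ excludes exactly the strings containing a character outside letterDict's keys,
-- on which the Python A (and B) raises KeyError.
def Pre_convert (a : String) : Prop :=
  (a.toList.all (fun c => ('A' ≤ c && c ≤ 'Z') || c == ' ')) = true
instance (a : String) : Decidable (Pre_convert a) := by unfold Pre_convert; infer_instance

def pvWitness_convert : String := "HI THERE"

def Spec_convert (a : String) (out : List (Int × Int)) : Prop := out = convert_alt a
instance (a : String) (out : List (Int × Int)) : Decidable (Spec_convert a out) := by unfold Spec_convert; infer_instance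

-- ===== CLAIM (what is proved, stated in full; the proofs are below) =====
def Claim_equal_convert : Prop := ∀ (a : String), Dom_convert a → Pre_convert a → Spec_convert a (convert a)

-- ===== LEMMAS AND PROOFS =====

-- structural version of the mask: bit 0 is the head
def bitsOfL : List Char → Int
  | [] => 0
  | c :: t => (if c == '#' then 1 else 0) + 2 * bitsOfL t

theorem bitsOfL_nonneg (l : List Char) : 0 ≤ bitsOfL l := by
  induction l with
  | nil => simp [bitsOfL]
  | cons c t ih => simp only [bitsOfL]; split <;> omega

theorem sum_enum (l : List Char) (k : Nat) (acc : Int) :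
    ((PySem.List.enumerate l (k : Int)).filter (fun p => p.2 == '#')).foldl
      (fun s p => s + 2 ^ p.1.toNat) acc
    = acc + 2 ^ k * bitsOfL l := by
  induction l generalizing k acc with
  | nil => simp [PySem.List.enumerate_nil, bitsOfL]
  | cons c t ih =>
    rw [PySem.List.enumerate_cons]
    have hc : ((k : Int) + 1) = ((k + 1 : Nat) : Int) := by push_cast; ring
    by_cases h : c = '#'
    · simp only [List.filter_cons, h, beq_self_eq_true, if_pos, List.foldl_cons, hc, ih,
        Int.toNat_natCast, bitsOfL, beq_self_eq_true, if_pos]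
      ring_nf
    · have hb : (c == '#') = false := by simp [h]
      simp only [List.filter_cons, hb, Bool.false_eq_true, if_false, hc, ih, bitsOfL, if_false]
      rw [pow_succ]
      ring

theorem bitsOf_eq (v : String) : bitsOf v = bitsOfL v.toList := by
  have := sum_enum v.toList 0 0
  simpa [bitsOf] using this

theorem get?_mk_map {κ ν ν' : Type} [BEq κ] (f : ν → ν') (l : List (κ × ν)) (c : κ) :
    PySem.Dict.get? (PySem.Dict.mk (l.map (fun kv => (kv.1, f kv.2)))) c
      = (PySem.Dict.get? (PySem.Dict.mk l) c).map f := by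
  induction l with
  | nil => rfl
  | cons kv t ih =>
    obtain ⟨k, v⟩ := kv
    simp only [List.map_cons, PySem.Dict.get?_mk_cons]
    split <;> simp [ih]

theorem getD_letterBitsB (c : Char) :
    PySem.Dict.getD letterBitsB c 0 = bitsOfL (PySem.Dict.getD letterDictA c "").toList := by
  have h := get?_mk_map bitsOf (PySem.Dict.items letterDictA) c
  rw [PySem.Dict.getD_eq_get?_getD, PySem.Dict.getD_eq_get?_getD]
  rw [show PySem.Dict.get? letterBitsB c = (PySem.Dict.get? letterDictA c).map bitsOf from h]
  cases PySem.Dict.get? letterDictA c with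
  | none => rfl
  | some bits => simp [bitsOf_eq]

-- the canonical per-glyph scan both loops reduce to
def scanE (piv : Int) (l : List (Int × Char)) (pts : List (Int × Int)) : List (Int × Int) :=
  l.foldl
    (fun pts p =>
      if p.2 == '#' then
        PySem.Set.add pts (6 * piv + PySem.Int.mod p.1 5, PySem.Int.floordiv p.1 5)
      else pts) pts

-- a zero mask means no '#': scanning adds nothing
theorem scanE_of_zero (l : List Char) (piv : Int) :
    ∀ (k : Int) (pts : List (Int × Int)), bitsOfL l = 0 →
      scanE piv (PySem.List.enumerate l k) pts = pts := by
  induction l with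
  | nil => intro k pts _; rfl
  | cons c t ih =>
    intro k pts h
    have hnn := bitsOfL_nonneg t
    simp only [bitsOfL] at h
    have hc : (c == '#') = false := by
      by_cases hc' : c = '#'
      · simp [hc'] at h ⊢; omega
      · simp [hc']
    have ht : bitsOfL t = 0 := by split at h <;> omega
    rw [PySem.List.enumerate_cons]
    simp only [scanE, List.foldl_cons, hc, Bool.false_eq_true, if_false]
    exact ih (k + 1) pts ht

-- B's while loop over the mask equals the scan of the char list
theorem glyph_eq (l : List Char) (piv : Int) :
    ∀ (k : Int) (pts : List (Int × Int)),
      glyphLoop pts (bitsOfL l) piv k = scanE piv (PySem.List.enumerate l k) pts := by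
  induction l with
  | nil => intro k pts; rw [glyphLoop]; simp [bitsOfL, scanE, PySem.List.enumerate_nil]
  | cons c t ih =>
    intro k pts
    have hnn := bitsOfL_nonneg t
    by_cases hz : bitsOfL (c :: t) = 0
    · rw [glyphLoop]
      rw [dif_pos (by omega)]
      exact (scanE_of_zero (c :: t) piv k pts hz).symm
    · have hpos : 0 < bitsOfL (c :: t) := by
        have := bitsOfL_nonneg (c :: t); omega
      rw [glyphLoop, dif_neg (by omega)]
      have hm : PySem.Int.mod (bitsOfL (c :: t)) 2 = (if c == '#' then 1 else 0) := by
        rw [PySem.Int.mod_eq_emod_of_pos (by omega)]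
        simp only [bitsOfL]
        split <;> omega
      have hd : PySem.Int.floordiv (bitsOfL (c :: t)) 2 = bitsOfL t := by
        rw [PySem.Int.floordiv_eq_ediv_of_pos (by omega)]
        simp only [bitsOfL]
        split <;> omega
      rw [hm, hd, PySem.List.enumerate_cons]
      simp only [scanE, List.foldl_cons]
      by_cases hc : c = '#'
      · simp only [hc, beq_self_eq_true, if_pos]
        exact ih (k + 1) _
      · have hb : (c == '#') = false := by simp [hc]
        simp only [hb, Bool.false_eq_true, if_false, ne_eq, not_true_eq_false]
        exact ih (k + 1) pts
      
-- A's index loop over the bitmap string equals the same scan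
theorem inner_eq (bits : String) (piv : Int) (pts : List (Int × Int)) :
    (PySem.List.pyRange 0 (PySem.Str.len bits) 1).foldl
      (fun pts i =>
        if PySem.Str.pyGet? bits i == some '#' then
          PySem.Set.add pts (6 * piv + PySem.Int.mod i 5, PySem.Int.floordiv i 5)
        else pts) pts
    = scanE piv (PySem.List.enumerate bits.toList 0) pts := by
  rw [PySem.List.enumerate_eq_map_pyRange (d := '#')]
  unfold scanE
  rw [List.foldl_map]
  have hlen : PySem.Str.len bits = ((bits.toList.length : Nat) : Int) := by
    simp [PySem.Str.len_eq]
  rw [hlen]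
  apply PySem.List.foldl_congr_mem
  intro acc i hi
  have hmem := PySem.List.mem_pyRange_one.mp hi
  obtain ⟨k, rfl⟩ : ∃ k : Nat, i = (k : Int) := ⟨i.toNat, by omega⟩
  have hk : k < bits.toList.length := by exact_mod_cast hmem.2
  simp only [PySem.Str.pyGet?_natCast, PySem.List.pyGetD_natCast, List.getD_eq_getElem?_getD]
  rw [List.getElem?_eq_getElem hk]
  rfl

-- outer loops agree (A: counter-carrying fold; B: fold over enumerate with glyphLoop)
theorem loop_eq (l : List Char) (piv : Int) (s : List (Int × Int)) :
    (l.foldl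
      (fun (st : List (Int × Int) × Int) c =>
        ((PySem.List.pyRange 0 (PySem.Str.len (PySem.Dict.getD letterDictA c "")) 1).foldl
          (fun pts i =>
            if PySem.Str.pyGet? (PySem.Dict.getD letterDictA c "") i == some '#' then
              PySem.Set.add pts (6 * st.2 + PySem.Int.mod i 5, PySem.Int.floordiv i 5)
            else pts) st.1,
         st.2 + 1)) (s, piv)).1
    = (PySem.List.enumerate l piv).foldl
        (fun pts pc => glyphLoop pts (PySem.Dict.getD letterBitsB pc.2 0) pc.1 0)
        s := by
  induction l generalizing piv s with
  | nil => rfl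
  | cons c t ih =>
    rw [List.foldl_cons, PySem.List.enumerate_cons, List.foldl_cons, ih]
    congr 1
    rw [getD_letterBitsB, glyph_eq _ piv 0 s]
    exact inner_eq _ piv s

-- ===== VERDICT (by name: the statement is the Claim_ definition above) =====
theorem convert_spec : Claim_equal_convert := by
  intro a _ _
  show convert a = convert_alt a
  exact loop_eq a.toList 0 PySem.Set.empty
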